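-- pv_equiv track=rewrite | github.com/benjaminzwhite/kattis | src/safepassage.py | f
-- ===== SOURCE A (Python) =====
-- def f(xs):
--     n = len(xs)
--
--     if n == 1: # not needed in our case since n>=2 always
--         return xs[0]
--     elif n == 2:
--         return xs[1]
--     elif n == 3:
--         return sum(xs)
--     else:
--         return f(xs[:-2]) + xs[0] + xs[-1] + min(2 * xs[1], xs[0] + xs[-2])
-- ===== SOURCE B (Python) =====
-- def f(xs):
--     n = len(xs)
--     if n == 1:
--         return xs[0]
--     if n == 2:
--         return xs[1]
--     a, b = xs[0], xs[1]
--     base = 3 if n % 2 else 2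
--     total = a + b + xs[2] if base == 3 else b
--     steps = (n - base) // 2
--     for j in range(steps):
--         m = base + 2 * j + 2
--         total += a + xs[m - 1] + min(2 * b, a + xs[m - 2])
--     return total
-- ===== Notes on version B (the rewrite author's own statement) =====
-- stated objective: faster
-- what changed: Replaces A's recursion that slices off the last two elements each call (copying the list every level) with a single O(n) loop over the peeled pair indices, accumulating the constant-head terms a=xs[0], b=xs[1] directly.
import Mathlib
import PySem

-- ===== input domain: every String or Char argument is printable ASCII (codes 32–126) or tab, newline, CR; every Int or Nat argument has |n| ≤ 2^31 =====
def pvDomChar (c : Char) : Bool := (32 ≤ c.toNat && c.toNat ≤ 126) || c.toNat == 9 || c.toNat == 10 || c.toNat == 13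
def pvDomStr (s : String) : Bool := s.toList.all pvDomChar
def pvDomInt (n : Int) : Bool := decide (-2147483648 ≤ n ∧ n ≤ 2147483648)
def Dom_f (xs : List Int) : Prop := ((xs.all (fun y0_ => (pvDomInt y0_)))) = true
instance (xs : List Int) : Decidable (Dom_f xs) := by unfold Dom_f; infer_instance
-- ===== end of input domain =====

-- B replaces A's slice-and-recurse peeling (O(n^2)) by one O(n) accumulation loop over the peeled pairs.

-- ===== PORT A =====
def f (xs : List Int) : Int :=
  if PySem.List.len xs = 1 then PySem.List.pyGetD xs 0 0
  else if PySem.List.len xs = 2 then PySem.List.pyGetD xs 1 0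
  else if PySem.List.len xs = 3 then xs.sum
  else if PySem.List.len xs ≤ 0 then 0  -- totality guard: on [] the Python recurses forever (excluded by Pre_)
  else f (PySem.List.slice xs none (some (-2))) + PySem.List.pyGetD xs 0 0 + PySem.List.pyGetD xs (-1) 0
        + min (2 * PySem.List.pyGetD xs 1 0) (PySem.List.pyGetD xs 0 0 + PySem.List.pyGetD xs (-2) 0)
termination_by xs.length
decreasing_by
  rw [PySem.List.slice_to_neg_ofNat xs 2 (by omega)]
  simp only [PySem.List.len_eq] at *
  simp only [List.length_take]
  omega

-- ===== PORT B =====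
def f_alt (xs : List Int) : Int :=
  let n := PySem.List.len xs
  if n = 1 then PySem.List.pyGetD xs 0 0
  else if n = 2 then PySem.List.pyGetD xs 1 0
  else
    let a := PySem.List.pyGetD xs 0 0
    let b := PySem.List.pyGetD xs 1 0
    let base : Int := if PySem.Int.mod n 2 ≠ 0 then 3 else 2
    let total : Int := if base = 3 then a + b + PySem.List.pyGetD xs 2 0 else b
    let steps := PySem.Int.floordiv (n - base) 2
    (PySem.List.pyRange 0 steps 1).foldl
      (fun t j =>
        let m := base + 2 * j + 2
        t + (a + PySem.List.pyGetD xs (m - 1) 0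
              + min (2 * b) (a + PySem.List.pyGetD xs (m - 2) 0))) total

-- ===== PRECONDITION & SPEC =====
-- Pre_ excludes only the empty list, on which Python A recurses forever (RecursionError) and B raises IndexError.
def Pre_f (xs : List Int) : Prop := xs ≠ []
instance (xs : List Int) : Decidable (Pre_f xs) := by unfold Pre_f; infer_instance
def pvWitness_f : List Int := [3, 1, 4, 1, 5]

def Spec_f (xs : List Int) (out : Int) : Prop := out = f_alt xs
instance (xs : List Int) (out : Int) : Decidable (Spec_f xs out) := by unfold Spec_f; infer_instance

-- ===== CLAIM (what is proved, stated in full; the proofs are below) =====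
def Claim_equal_f : Prop := ∀ (xs : List Int), Dom_f xs → Pre_f xs → Spec_f xs (f xs)

-- ===== LEMMAS AND PROOFS =====


-- the per-peel summand of B's loop, as a function of the pair index j
def pvG (xs : List Int) (base j : Int) : Int :=
  PySem.List.pyGetD xs 0 0 + PySem.List.pyGetD xs (base + 2 * j + 2 - 1) 0
    + min (2 * PySem.List.pyGetD xs 1 0)
        (PySem.List.pyGetD xs 0 0 + PySem.List.pyGetD xs (base + 2 * j + 2 - 2) 0)

lemma falt_sum_even (xs : List Int) (_h : 2 ≤ xs.length) (he : xs.length % 2 = 0) :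
    f_alt xs = PySem.List.pyGetD xs 1 0
      + ((PySem.List.pyRange 0 ((((xs.length : Int)) - 2) / 2) 1).map (pvG xs 2)).sum := by
  unfold f_alt
  simp only [PySem.List.len_eq]
  rw [if_neg (by omega)]
  by_cases h2 : xs.length = 2
  · rw [if_pos (by exact_mod_cast h2)]
    have : (((xs.length : Int)) - 2) / 2 = 0 := by omega
    simp [this]
  · rw [if_neg (by omega)]
    have hm : PySem.Int.mod ((xs.length : Int)) 2 = 0 := by
      rw [PySem.Int.mod_eq_emod_of_pos (by norm_num)]; omega
    rw [PySem.Int.floordiv_eq_ediv_of_pos (by norm_num)]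
    simp only [hm, ne_eq, not_true_eq_false, if_false, if_neg (by norm_num : ¬ (2:Int) = 3),
      PySem.List.foldl_add]
    rfl

lemma falt_sum_odd (xs : List Int) (h : 3 ≤ xs.length) (ho : xs.length % 2 = 1) :
    f_alt xs = PySem.List.pyGetD xs 0 0 + PySem.List.pyGetD xs 1 0 + PySem.List.pyGetD xs 2 0
      + ((PySem.List.pyRange 0 ((((xs.length : Int)) - 3) / 2) 1).map (pvG xs 3)).sum := by
  unfold f_alt
  simp only [PySem.List.len_eq]
  rw [if_neg (by omega), if_neg (by omega)]
  have hm : PySem.Int.mod ((xs.length : Int)) 2 ≠ 0 := by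
    rw [PySem.Int.mod_eq_emod_of_pos (by norm_num)]; omega
  rw [PySem.Int.floordiv_eq_ediv_of_pos (by norm_num)]
  simp only [hm, ne_eq, not_false_eq_true, if_true, PySem.List.foldl_add]
  rfl

lemma take_pyGetD (xs : List Int) (k : Nat) (i : Int) (h0 : 0 ≤ i) (hi : i < (k : Int))
    (hk : k ≤ xs.length) :
    PySem.List.pyGetD (xs.take k) i 0 = PySem.List.pyGetD xs i 0 := by
  rw [PySem.List.pyGetD_eq_getElem _ _ h0 (by simp [List.length_take]; omega),
      PySem.List.pyGetD_eq_getElem _ _ h0 (by omega)]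
  exact List.getElem_take

lemma pvG_take (xs : List Int) (k : Nat) (base j : Int) (h0 : 0 ≤ base) (hj : 0 ≤ j)
    (hk : k ≤ xs.length) (h2 : 2 ≤ k) (hm : base + 2 * j + 2 ≤ (k : Int)) :
    pvG (xs.take k) base j = pvG xs base j := by
  unfold pvG
  rw [take_pyGetD xs k 0 (by omega) (by omega) hk,
      take_pyGetD xs k 1 (by omega) (by omega) hk,
      take_pyGetD xs k (base + 2 * j + 2 - 1) (by omega) (by omega) hk,
      take_pyGetD xs k (base + 2 * j + 2 - 2) (by omega) (by omega) hk]

lemma f_eq_f_alt (xs : List Int) (hne : xs ≠ []) : f xs = f_alt xs := by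
  suffices H : ∀ (n : Nat) (xs : List Int), xs.length = n → xs ≠ [] → f xs = f_alt xs from
    H xs.length xs rfl hne
  clear hne xs
  intro n
  induction n using Nat.strong_induction_on with
  | _ n IH =>
  intro xs hlen hne
  have hpos : 1 ≤ n := by
    cases xs with
    | nil => exact absurd rfl hne
    | cons y ys => simp at hlen; omega
  by_cases e1 : n = 1
  · subst e1
    obtain ⟨x, rfl⟩ := List.length_eq_one_iff.mp hlen
    rw [f]; unfold f_alt
    norm_num [PySem.List.len_eq, PySem.List.pyGetD_zero_cons]
  by_cases e2 : n = 2
  · subst e2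
    match xs, hlen with
    | [x, y], _ =>
      rw [f]; unfold f_alt
      norm_num [PySem.List.len_eq]
  by_cases e3 : n = 3
  · subst e3
    match xs, hlen with
    | [x, y, z], _ =>
      rw [f]
      rw [falt_sum_odd _ (by norm_num) (by norm_num)]
      norm_num [PySem.List.len_eq, PySem.List.pyRange_zero]
      rw [show PySem.List.pyGetD [x, y, z] 1 0 = y from rfl,
          show PySem.List.pyGetD [x, y, z] 2 0 = z from rfl]
      ring
  -- n ≥ 4
  have h4 : 4 ≤ n := by omega
  rw [f]
  simp only [PySem.List.len_eq, hlen]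
  rw [if_neg (by omega), if_neg (by omega), if_neg (by omega), if_neg (by omega)]
  rw [PySem.List.slice_to_neg_ofNat xs 2 (by omega)]
  rw [hlen]
  have hylen : (xs.take (n - 2)).length = n - 2 := by simp [List.length_take]; omega
  rw [IH (n - 2) (by omega) (xs.take (n - 2)) hylen
      (by intro h; rw [h] at hylen; simp at hylen; omega)]
  rw [PySem.List.pyGetD_neg_ofNat xs 1 0 (by omega) (by omega),
      PySem.List.pyGetD_neg_ofNat xs 2 0 (by omega) (by omega)]
  simp only [hlen]
  by_cases hpar : n % 2 = 0
  · -- even length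
    rw [falt_sum_even xs (by omega) (by omega),
        falt_sum_even (xs.take (n - 2)) (by omega) (by omega)]
    simp only [hlen, hylen]
    have key : (((n : Nat) : Int) - 2) / 2 = (((n - 2 : Nat) : Int) - 2) / 2 + 1 := by omega
    rw [key, PySem.List.pyRange_one_succ_right (by omega)]
    rw [List.map_append, List.sum_append]
    rw [List.map_congr_left (fun j hj => by
      have hj' := (PySem.List.mem_pyRange_one).mp hj
      exact pvG_take xs (n - 2) 2 j (by omega) (by omega) (by omega) (by omega) (by omega))]
    rw [take_pyGetD xs (n - 2) 1 (by omega) (by omega) (by omega)]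
    have hidx1 : (2 + 2 * (((((n - 2 : Nat) : Int)) - 2) / 2) + 2 - 1 : Int) = ((n - 1 : Nat) : Int) := by omega
    have hidx2 : (2 + 2 * (((((n - 2 : Nat) : Int)) - 2) / 2) + 2 - 2 : Int) = ((n - 2 : Nat) : Int) := by omega
    simp only [List.map_cons, List.map_nil, List.sum_cons, List.sum_nil]
    rw [pvG, hidx1, hidx2]
    rw [PySem.List.pyGetD_natCast, PySem.List.pyGetD_natCast,
        List.getD_eq_getElem xs 0 (by omega), List.getD_eq_getElem xs 0 (by omega)]
    ring
  · -- odd length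
    rw [falt_sum_odd xs (by omega) (by omega),
        falt_sum_odd (xs.take (n - 2)) (by omega) (by omega)]
    simp only [hlen, hylen]
    have key : (((n : Nat) : Int) - 3) / 2 = (((n - 2 : Nat) : Int) - 3) / 2 + 1 := by omega
    rw [key, PySem.List.pyRange_one_succ_right (by omega)]
    rw [List.map_append, List.sum_append]
    rw [List.map_congr_left (fun j hj => by
      have hj' := (PySem.List.mem_pyRange_one).mp hj
      exact pvG_take xs (n - 2) 3 j (by omega) (by omega) (by omega) (by omega) (by omega))]
    rw [take_pyGetD xs (n - 2) 0 (by omega) (by omega) (by omega),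
        take_pyGetD xs (n - 2) 1 (by omega) (by omega) (by omega),
        take_pyGetD xs (n - 2) 2 (by omega) (by omega) (by omega)]
    have hidx1 : (3 + 2 * (((((n - 2 : Nat) : Int)) - 3) / 2) + 2 - 1 : Int) = ((n - 1 : Nat) : Int) := by omega
    have hidx2 : (3 + 2 * (((((n - 2 : Nat) : Int)) - 3) / 2) + 2 - 2 : Int) = ((n - 2 : Nat) : Int) := by omega
    simp only [List.map_cons, List.map_nil, List.sum_cons, List.sum_nil]
    rw [pvG, hidx1, hidx2]
    rw [PySem.List.pyGetD_natCast, PySem.List.pyGetD_natCast,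
        List.getD_eq_getElem xs 0 (by omega), List.getD_eq_getElem xs 0 (by omega)]
    ring

-- ===== VERDICT (by name: the statement is the Claim_ definition above) =====
theorem f_spec : Claim_equal_f := by
  intro xs _ hpre
  unfold Spec_f
  exact f_eq_f_alt xs hpre
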